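-- pv_equiv track=rewrite | github.com/keenerd/namcap | Namcap/rules/py_mtime.py | _quick_filter
-- ===== SOURCE A (Python) =====
-- def _quick_filter(names):
-- 	"can this package be skipped outright"
-- 	if not names:
-- 		return True
-- 	found_py  = any(n.endswith('.py')  for n in names)
-- 	found_pyc = any(n.endswith('.pyc') for n in names)
-- 	found_pyo = any(n.endswith('.pyo') for n in names)
-- 	if found_py and found_pyc:
-- 		return False
-- 	if found_py and found_pyo:
-- 		return False
-- 	return True
-- ===== SOURCE B (Python) =====
-- def _quick_filter(names):
--     "can this package be skipped outright"
--     found_py = found_pyc = found_pyo = False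
--     for n in names:
--         if n.endswith('.py'):
--             found_py = True
--         if n.endswith('.pyc'):
--             found_pyc = True
--         if n.endswith('.pyo'):
--             found_pyo = True
--         if found_py and (found_pyc or found_pyo):
--             return False
--     return True
-- ===== Notes on version B (the rewrite author's own statement) =====
-- stated objective: alternative
-- what changed: Replaces the three separate any() scans over names with a single pass maintaining three booleans and an early return as soon as a .py file and a compiled .pyc/.pyo file have both been seen.
import Mathlib
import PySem

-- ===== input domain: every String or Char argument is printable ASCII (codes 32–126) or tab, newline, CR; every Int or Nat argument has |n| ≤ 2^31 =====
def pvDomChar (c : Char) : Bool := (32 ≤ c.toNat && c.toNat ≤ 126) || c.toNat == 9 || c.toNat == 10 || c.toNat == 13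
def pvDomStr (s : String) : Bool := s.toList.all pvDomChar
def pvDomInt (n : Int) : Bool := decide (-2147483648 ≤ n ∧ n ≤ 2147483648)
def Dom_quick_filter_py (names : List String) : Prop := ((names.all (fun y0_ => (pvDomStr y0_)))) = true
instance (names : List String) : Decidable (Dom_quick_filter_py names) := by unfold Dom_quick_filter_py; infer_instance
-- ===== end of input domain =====

-- B replaces A's three any() scans with one pass keeping three booleans and an early exit (alternative decomposition, same cost class).

-- ===== PORT A =====
def quick_filter_py (names : List String) : Bool :=
  if names.isEmpty then true
  else
    let found_py  := names.any (fun n => PySem.Str.endswith n ".py")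
    let found_pyc := names.any (fun n => PySem.Str.endswith n ".pyc")
    let found_pyo := names.any (fun n => PySem.Str.endswith n ".pyo")
    if found_py && found_pyc then false
    else if found_py && found_pyo then false
    else true

-- ===== PORT B =====
-- the for-loop with early `return False`, as structural recursion over names with the three flags as state
def quick_filter_py_altLoop (names : List String) (py pyc pyo : Bool) : Bool :=
  match names with
  | [] => true
  | n :: rest =>
    let py := if PySem.Str.endswith n ".py" then true else py
    let pyc := if PySem.Str.endswith n ".pyc" then true else pyc
    let pyo := if PySem.Str.endswith n ".pyo" then true else pyo
    if py && (pyc || pyo) then false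
    else quick_filter_py_altLoop rest py pyc pyo

def quick_filter_py_alt (names : List String) : Bool :=
  quick_filter_py_altLoop names false false false

-- ===== PRECONDITION & SPEC =====
def Spec_quick_filter_py (names : List String) (out : Bool) : Prop := out = quick_filter_py_alt names
instance (names : List String) (out : Bool) : Decidable (Spec_quick_filter_py names out) := by unfold Spec_quick_filter_py; infer_instance

-- ===== CLAIM (what is proved, stated in full; the proofs are below) =====
def Claim_equal_quick_filter_py : Prop := ∀ (names : List String), Dom_quick_filter_py names → Spec_quick_filter_py names (quick_filter_py names)

-- ===== LEMMAS AND PROOFS =====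


theorem altLoop_eq (names : List String) : ∀ (py pyc pyo : Bool),
    (py && (pyc || pyo)) = false →
    quick_filter_py_altLoop names py pyc pyo =
      !((py || names.any (fun n => PySem.Str.endswith n ".py")) &&
        ((pyc || names.any (fun n => PySem.Str.endswith n ".pyc")) ||
         (pyo || names.any (fun n => PySem.Str.endswith n ".pyo")))) := by
  induction names with
  | nil =>
    intro py pyc pyo h
    simpa [quick_filter_py_altLoop] using congrArg (!·) h.symm
  | cons n rest ih =>
    intro py pyc pyo _
    simp only [quick_filter_py_altLoop, List.any_cons]
    have e1 : ∀ (b x : Bool), (if b then true else x) = (b || x) := by decide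
    rw [e1, e1, e1]
    generalize PySem.Str.endswith n ".py" = p
    generalize PySem.Str.endswith n ".pyc" = c
    generalize PySem.Str.endswith n ".pyo" = o
    by_cases hg : ((p || py) && ((c || pyc) || (o || pyo))) = true
    · rw [if_pos hg]
      generalize rest.any (fun n => PySem.Str.endswith n ".py") = aP
      generalize rest.any (fun n => PySem.Str.endswith n ".pyc") = aC
      generalize rest.any (fun n => PySem.Str.endswith n ".pyo") = aO
      revert hg
      cases p <;> cases c <;> cases o <;> cases py <;> cases pyc <;> cases pyo <;>
        cases aP <;> cases aC <;> cases aO <;> decide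
    · rw [if_neg hg, ih _ _ _ (by simpa using hg)]
      generalize rest.any (fun n => PySem.Str.endswith n ".py") = aP
      generalize rest.any (fun n => PySem.Str.endswith n ".pyc") = aC
      generalize rest.any (fun n => PySem.Str.endswith n ".pyo") = aO
      cases p <;> cases c <;> cases o <;> cases py <;> cases pyc <;> cases pyo <;>
        cases aP <;> cases aC <;> cases aO <;> decide

-- ===== VERDICT (by name: the statement is the Claim_ definition above) =====
theorem quick_filter_py_spec : Claim_equal_quick_filter_py := by
  intro names _
  show quick_filter_py names = quick_filter_py_alt names
  unfold quick_filter_py quick_filter_py_alt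
  rw [altLoop_eq names false false false rfl]
  cases names with
  | nil => simp
  | cons n rest =>
    rw [if_neg (by simp)]
    generalize (n :: rest).any (fun n => PySem.Str.endswith n ".py") = aP
    generalize (n :: rest).any (fun n => PySem.Str.endswith n ".pyc") = aC
    generalize (n :: rest).any (fun n => PySem.Str.endswith n ".pyo") = aO
    cases aP <;> cases aC <;> cases aO <;> decide
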